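-- pv_equiv track=rewrite | github.com/kryptifyy/video-factory | engines/pitch_engine.py | _find_consecutive_match
-- ===== SOURCE A (Python) =====
-- from typing import Optional
--
-- def _find_consecutive_match(
--     target_words: list[str],
--     normalized_ts: list[str],
--     used_indices: set[int],
-- ) -> Optional[list[int]]:
--     """Slide through normalized_ts looking for a consecutive match of target_words.
--
--     Returns the list of matched indices, or None if no match found.
--     Skips positions that overlap with used_indices.
--     """
--     n = len(target_words)
--     for i in range(len(normalized_ts) - n + 1):
--         indices = list(range(i, i + n))
--
--         # Skip if any index already used
--         if any(idx in used_indices for idx in indices):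
--             continue
--
--         # Check all words match
--         if all(normalized_ts[i + j] == target_words[j] for j in range(n)):
--             return indices
--
--     return None
-- ===== SOURCE B (Python) =====
-- from typing import Optional
--
-- def _find_consecutive_match(
--     target_words: list[str],
--     normalized_ts: list[str],
--     used_indices: set[int],
-- ) -> Optional[list[int]]:
--     """Staged-array approach: one backward pass precomputes, for every position,
--     the length of the run of unused indices starting there; a transposed pass over
--     the pattern columns marks which window starts match; a final scan returns the
--     first start that both matches and has a free run of at least len(target_words)."""
--     n = len(target_words)
--     total = len(normalized_ts)
--     starts = total - n + 1
--     if starts <= 0: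
--         return None
--     # free[i] = number of consecutive positions >= i (up to total) not in used_indices
--     free = [0] * (total + 1)
--     for i in range(total - 1, -1, -1):
--         free[i] = 0 if i in used_indices else free[i + 1] + 1
--     # ok[i] <-> the window starting at i matches target_words (column-wise elimination)
--     ok = [True] * starts
--     for j, w in enumerate(target_words):
--         ok = [b and normalized_ts[i + j] == w for i, b in enumerate(ok)]
--     for i in range(starts):
--         if ok[i] and free[i] >= n:
--             return list(range(i, i + n))
--     return None
-- ===== Notes on version B (the rewrite author's own statement) =====
-- stated objective: alternative
-- what changed: B replaces A's per-window scanning (rebuilding an index list and running any/all generators at every offset) by three staged array passes: a backward pass precomputing the free-run length of unused positions at every index, a transposed column-wise pass over the pattern that eliminates non-matching window starts, and a final linear scan picking the first start that matches and whose free run covers the window.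
import Mathlib
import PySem

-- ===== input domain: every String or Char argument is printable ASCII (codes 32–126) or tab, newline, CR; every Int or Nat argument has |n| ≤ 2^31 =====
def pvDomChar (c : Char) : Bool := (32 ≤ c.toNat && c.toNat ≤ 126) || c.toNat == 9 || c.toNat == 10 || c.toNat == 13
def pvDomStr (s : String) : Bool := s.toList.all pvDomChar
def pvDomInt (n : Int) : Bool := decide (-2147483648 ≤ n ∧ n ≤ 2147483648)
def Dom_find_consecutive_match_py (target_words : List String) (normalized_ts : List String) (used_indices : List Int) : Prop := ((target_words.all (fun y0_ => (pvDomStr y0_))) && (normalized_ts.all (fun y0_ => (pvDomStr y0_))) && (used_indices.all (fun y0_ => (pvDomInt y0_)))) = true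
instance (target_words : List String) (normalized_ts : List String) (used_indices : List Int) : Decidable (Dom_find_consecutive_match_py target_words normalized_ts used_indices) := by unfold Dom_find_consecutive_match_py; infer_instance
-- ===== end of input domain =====

-- B replaces A's per-window any/all scanning by three staged array passes (free-run
-- precomputation, column-wise match elimination, one final scan); alternative, same cost.

-- ===== PORT A =====
-- loop over i in range(len(normalized_ts) - n + 1), recursion over the index list
def pvALoop (target_words normalized_ts : List String) (used_indices : List Int) :
    List Int → Option (List Int)
  | [] => none
  | i :: rest =>
    let n : Int := PySem.List.len target_words
    let indices := PySem.List.pyRange i (i + n) 1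
    if indices.any (fun idx => PySem.Set.contains used_indices idx) then
      pvALoop target_words normalized_ts used_indices rest
    else if (PySem.List.pyRange 0 n 1).all
        (fun j => PySem.List.pyGetD normalized_ts (i + j) "" == PySem.List.pyGetD target_words j "") then
      some indices
    else
      pvALoop target_words normalized_ts used_indices rest

def find_consecutive_match_py (target_words : List String) (normalized_ts : List String) (used_indices : List Int) : Option (List Int) :=
  let n : Int := PySem.List.len target_words
  pvALoop target_words normalized_ts used_indices
    (PySem.List.pyRange 0 (PySem.List.len normalized_ts - n + 1) 1)

-- ===== PORT B =====
-- the backward loop `for i in range(total-1,-1,-1): free[i] = 0 if i in used else free[i+1]+1`,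
-- as a recursion pushing elements to the front: pvFreeAux used total c is free[total-c..total]
def pvFreeAux (used : List Int) (total : Nat) : Nat → List Int
  | 0 => [0]
  | c + 1 =>
    let acc := pvFreeAux used total c
    (if PySem.Set.contains used ((total - (c + 1) : Nat) : Int) then 0 else acc.headD 0 + 1) :: acc

-- `for j, w in enumerate(target_words): ok = [b and ts[i+j] == w for i, b in enumerate(ok)]`
def pvOkLoop (ts : List String) : List String → Int → List Bool → List Bool
  | [], _, ok => ok
  | w :: rest, j, ok =>
    pvOkLoop ts rest (j + 1)
      ((PySem.List.enumerate ok 0).map (fun p => p.2 && (PySem.List.pyGetD ts (p.1 + j) "" == w)))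

def find_consecutive_match_py_alt (target_words : List String) (normalized_ts : List String) (used_indices : List Int) : Option (List Int) :=
  let n : Int := PySem.List.len target_words
  let total : Int := PySem.List.len normalized_ts
  let starts : Int := total - n + 1
  if starts ≤ 0 then none
  else
    let free := pvFreeAux used_indices normalized_ts.length normalized_ts.length
    let ok := pvOkLoop normalized_ts target_words 0 (List.replicate starts.toNat true)
    ((PySem.List.pyRange 0 starts 1).find?
        (fun i => ok.getD i.toNat false && decide (n ≤ free.getD i.toNat 0))).map
      (fun i => PySem.List.pyRange i (i + n) 1)

-- ===== PRECONDITION & SPEC =====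
def Spec_find_consecutive_match_py (target_words : List String) (normalized_ts : List String) (used_indices : List Int) (out : Option (List Int)) : Prop := out = find_consecutive_match_py_alt target_words normalized_ts used_indices
instance (target_words : List String) (normalized_ts : List String) (used_indices : List Int) (out : Option (List Int)) : Decidable (Spec_find_consecutive_match_py target_words normalized_ts used_indices out) := by unfold Spec_find_consecutive_match_py; infer_instance

-- ===== CLAIM =====
def Claim_equal_find_consecutive_match_py : Prop := ∀ (target_words : List String) (normalized_ts : List String) (used_indices : List Int), Dom_find_consecutive_match_py target_words normalized_ts used_indices → Spec_find_consecutive_match_py target_words normalized_ts used_indices (find_consecutive_match_py target_words normalized_ts used_indices)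

-- ===== LEMMAS AND PROOFS =====

-- the condition A's loop tests at position i
def pvCondA (target_words normalized_ts : List String) (used_indices : List Int) (i : Int) : Bool :=
  !(PySem.List.pyRange i (i + PySem.List.len target_words) 1).any
      (fun idx => PySem.Set.contains used_indices idx) &&
  (PySem.List.pyRange 0 (PySem.List.len target_words) 1).all
      (fun j => PySem.List.pyGetD normalized_ts (i + j) "" == PySem.List.pyGetD target_words j "")

lemma pvALoop_eq_find (tw ts : List String) (u : List Int) (l : List Int) :
    pvALoop tw ts u l =
      (l.find? (pvCondA tw ts u)).map (fun i => PySem.List.pyRange i (i + PySem.List.len tw) 1) := by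
  induction l with
  | nil => rfl
  | cons i rest ih =>
    cases h1 : (PySem.List.pyRange i (i + PySem.List.len tw) 1).any
        (fun idx => PySem.Set.contains u idx) with
    | true =>
      have hc : pvCondA tw ts u i = false := by
        simp only [pvCondA, h1, Bool.not_true, Bool.false_and]
      rw [List.find?_cons_of_neg (by rw [hc]; exact Bool.false_ne_true)]
      simp only [pvALoop]
      rw [if_pos h1]
      exact ih
    | false =>
      cases h2 : (PySem.List.pyRange 0 (PySem.List.len tw) 1).all
          (fun j => PySem.List.pyGetD ts (i + j) "" == PySem.List.pyGetD tw j "") with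
      | true =>
        have hc : pvCondA tw ts u i = true := by
          simp only [pvCondA, h1, h2, Bool.not_false, Bool.true_and]
        rw [List.find?_cons_of_pos hc]
        simp only [pvALoop]
        rw [if_neg (by rw [h1]; exact Bool.false_ne_true), if_pos h2]
        rfl
      | false =>
        have hc : pvCondA tw ts u i = false := by
          simp only [pvCondA, h1, h2, Bool.not_false, Bool.true_and]
        rw [List.find?_cons_of_neg (by rw [hc]; exact Bool.false_ne_true)]
        simp only [pvALoop]
        rw [if_neg (by rw [h1]; exact Bool.false_ne_true),
          if_neg (by rw [h2]; exact Bool.false_ne_true)]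
        exact ih

-- spec value of the free-run array: pvFreeVal used total c = free[total - c]
def pvFreeVal (used : List Int) (total : Nat) : Nat → Int
  | 0 => 0
  | c + 1 =>
    if PySem.Set.contains used ((total - (c + 1) : Nat) : Int) then 0 else pvFreeVal used total c + 1

lemma pvFreeAux_headD (used : List Int) (total c : Nat) :
    (pvFreeAux used total c).headD 0 = pvFreeVal used total c := by
  induction c with
  | zero => rfl
  | succ c ih => simp [pvFreeAux, pvFreeVal, ← ih, List.headD]

lemma pvFreeAux_getD (used : List Int) (total : Nat) :
    ∀ c j, j ≤ c → (pvFreeAux used total c).getD j 0 = pvFreeVal used total (c - j) := by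
  intro c
  induction c with
  | zero =>
    intro j hj
    interval_cases j
    exact pvFreeAux_headD used total 0
  | succ c ih =>
    intro j hj
    cases j with
    | zero =>
      simpa [List.getD] using pvFreeAux_headD used total (c + 1)
    | succ j =>
      show (pvFreeAux used total (c + 1)).getD (j + 1) 0 = _
      rw [show pvFreeAux used total (c + 1) =
        (if PySem.Set.contains used ((total - (c + 1) : Nat) : Int) then 0
          else (pvFreeAux used total c).headD 0 + 1) :: pvFreeAux used total c from rfl]
      simp only [List.getD_cons_succ]
      rw [ih j (by omega)]
      congr 1
      omega

lemma pvFreeVal_nonneg (used : List Int) (total c : Nat) : 0 ≤ pvFreeVal used total c := by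
  induction c with
  | zero => simp [pvFreeVal]
  | succ c ih => simp only [pvFreeVal]; split <;> omega

lemma pvFreeVal_ge_iff (used : List Int) (total : Nat) :
    ∀ n c, n ≤ c → c ≤ total →
      ((n : Int) ≤ pvFreeVal used total c ↔
        ∀ k, k < n → ((total - c + k : Nat) : Int) ∉ used) := by
  intro n
  induction n with
  | zero =>
    intro c _ _
    simp [pvFreeVal_nonneg]
  | succ n ih =>
    intro c hn hc
    obtain ⟨c', rfl⟩ : ∃ c', c = c' + 1 := ⟨c - 1, by omega⟩
    simp only [pvFreeVal]
    by_cases hu : ((total - (c' + 1) : Nat) : Int) ∈ used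
    · simp only [PySem.Set.contains, hu, if_pos, List.contains_iff_mem]
      constructor
      · intro h
        have := pvFreeVal_nonneg used total c'
        omega
      · intro h
        exact absurd hu (by simpa using h 0 (by omega))
    · simp only [PySem.Set.contains, List.contains_iff_mem] at *
      rw [if_neg (by simpa using hu)]
      have h1 : ((n + 1 : Nat) : Int) ≤ pvFreeVal used total c' + 1 ↔
          (n : Int) ≤ pvFreeVal used total c' := by push_cast; omega
      rw [h1, ih c' (by omega) (by omega)]
      constructor
      · intro h k hk
        cases k with
        | zero => exact hu
        | succ k =>
          have := h k (by omega)
          rw [show total - (c' + 1) + (k + 1) = total - c' + k by omega]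
          exact this
      · intro h k hk
        have := h (k + 1) (by omega)
        rw [show total - (c' + 1) + (k + 1) = total - c' + k by omega] at this
        exact this

-- pointwise-match predicate computed by B's ok loop at one start position
def pvMatchFrom (ts : List String) (i : Int) : List String → Int → Bool
  | [], _ => true
  | w :: rest, j => (PySem.List.pyGetD ts (i + j) "" == w) && pvMatchFrom ts i rest (j + 1)

lemma pvMapEnum_getD (ts : List String) (w : String) (j : Int) (ok : List Bool) (i : Nat)
    (hi : i < ok.length) :
    ((PySem.List.enumerate ok 0).map
        (fun p => p.2 && (PySem.List.pyGetD ts (p.1 + j) "" == w))).getD i false =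
      (ok.getD i false && (PySem.List.pyGetD ts ((i : Int) + j) "" == w)) := by
  rw [PySem.List.enumerate_eq_map_pyRange ok false, List.map_map, PySem.List.pyRange_one]
  simp only [PySem.List.len_eq, Int.sub_zero, Int.toNat_natCast, List.map_map]
  rw [List.getD_eq_getElem _ _ (by simpa using hi)]
  simp only [List.getElem_map, List.getElem_range, Function.comp_def, Int.zero_add]
  rw [PySem.List.pyGetD_natCast, List.getD_eq_getElem _ _ hi]

lemma pvOkLoop_getD (ts : List String) :
    ∀ l j ok (i : Nat), i < ok.length →
      (pvOkLoop ts l j ok).getD i false = (ok.getD i false && pvMatchFrom ts (i : Int) l j) := by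
  intro l
  induction l with
  | nil => intro j ok i hi; simp [pvOkLoop, pvMatchFrom]
  | cons w rest ih =>
    intro j ok i hi
    show (pvOkLoop ts rest (j + 1) _).getD i false = _
    rw [ih (j + 1) _ i (by simp [PySem.List.length_enumerate]; exact hi),
      pvMapEnum_getD ts w j ok i hi]
    simp [pvMatchFrom, Bool.and_assoc]

lemma pvMatchFrom_iff (ts : List String) (i : Int) :
    ∀ tw (j : Int),
      pvMatchFrom ts i tw j = true ↔
        ∀ k : Nat, (h : k < tw.length) → PySem.List.pyGetD ts (i + j + k) "" = tw[k] := by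
  intro tw
  induction tw with
  | nil => intro j; simp [pvMatchFrom]
  | cons w rest ih =>
    intro j
    simp only [pvMatchFrom, Bool.and_eq_true, beq_iff_eq, ih (j + 1)]
    constructor
    · rintro ⟨h0, hrest⟩ k hk
      cases k with
      | zero => simpa using h0
      | succ k =>
        have := hrest k (by simpa using Nat.lt_of_succ_lt_succ hk)
        rw [show i + (j + 1) + (k : Int) = i + j + ((k : Nat) + 1 : Nat) by push_cast; ring] at this
        simpa using this
    · intro h
      refine ⟨by simpa using h 0 (by simp), ?_⟩
      intro k hk
      have := h (k + 1) (by simpa using Nat.succ_lt_succ hk)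
      rw [show i + j + ((k : Nat) + 1 : Nat) = i + (j + 1) + (k : Int) by push_cast; ring] at this
      simpa using this

-- A's all-j window test equals B's pvMatchFrom
lemma pvAllMatch_eq (ts tw : List String) (i : Int) :
    ((PySem.List.pyRange 0 (PySem.List.len tw) 1).all
        (fun j => PySem.List.pyGetD ts (i + j) "" == PySem.List.pyGetD tw j "")) =
      pvMatchFrom ts i tw 0 := by
  rw [Bool.eq_iff_iff, pvMatchFrom_iff]
  simp only [List.all_eq_true, PySem.List.mem_pyRange_one, PySem.List.len_eq, beq_iff_eq]
  constructor
  · intro h k hk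
    have := h (k : Int) ⟨by positivity, by exact_mod_cast hk⟩
    rw [PySem.List.pyGetD_natCast, List.getD_eq_getElem _ _ hk] at this
    simpa using this
  · intro h x hx
    obtain ⟨hx0, hx1⟩ := hx
    have hk : x.toNat < tw.length := by omega
    have := h x.toNat hk
    rw [show x = ((x.toNat : Nat) : Int) from (Int.toNat_of_nonneg hx0).symm,
      PySem.List.pyGetD_natCast, List.getD_eq_getElem _ _ hk]
    simpa using this

-- A's any-used window test equals B's free-run threshold
lemma pvFree_eq (used : List Int) (ts tw : List String) (i : Nat)
    (hle : i + tw.length ≤ ts.length) :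
    (!(PySem.List.pyRange (i : Int) ((i : Int) + PySem.List.len tw) 1).any
        (fun idx => PySem.Set.contains used idx)) =
      decide ((PySem.List.len tw) ≤
        (pvFreeAux used ts.length ts.length).getD i 0) := by
  rw [pvFreeAux_getD used ts.length ts.length i (by omega)]
  simp only [PySem.List.len_eq]
  rw [Bool.eq_iff_iff]
  simp only [Bool.not_eq_true', List.any_eq_false, PySem.List.mem_pyRange_one, decide_eq_true_eq,
    PySem.Set.contains, List.contains_iff_mem]
  rw [pvFreeVal_ge_iff used ts.length tw.length (ts.length - i) (by omega) (by omega)]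
  constructor
  · intro h k hk
    apply h
    constructor
    · rw [show ts.length - (ts.length - i) + k = i + k by omega]; push_cast; omega
    · rw [show ts.length - (ts.length - i) + k = i + k by omega]; push_cast; omega
  · intro h x hx
    obtain ⟨hx0, hx1⟩ := hx
    have hk : (x - i).toNat < tw.length := by omega
    have := h (x - (i : Int)).toNat hk
    rw [show ((ts.length - (ts.length - i) + (x - (i : Int)).toNat : Nat) : Int) = x by
      push_cast; omega] at this
    exact this

-- find? congruence for pointwise-equal predicates
lemma pvFindCongr {α : Type} (l : List α) (p q : α → Bool) (h : ∀ x ∈ l, p x = q x) :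
    l.find? p = l.find? q := by
  induction l with
  | nil => rfl
  | cons x xs ih =>
    cases hq : q x with
    | true => rw [List.find?_cons_of_pos ((h x List.mem_cons_self).trans hq)]
              rw [List.find?_cons_of_pos hq]
    | false =>
      rw [List.find?_cons_of_neg (by simp [(h x List.mem_cons_self).trans hq]),
        List.find?_cons_of_neg (by simp [hq])]
      exact ih fun y hy => h y (List.mem_cons_of_mem _ hy)

-- ===== VERDICT =====
theorem find_consecutive_match_py_spec : Claim_equal_find_consecutive_match_py := by
  unfold Claim_equal_find_consecutive_match_py Spec_find_consecutive_match_py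
  intro tw ts u _
  rw [show find_consecutive_match_py tw ts u =
      pvALoop tw ts u (PySem.List.pyRange 0
        (PySem.List.len ts - PySem.List.len tw + 1) 1) from rfl,
    pvALoop_eq_find]
  by_cases hs : (PySem.List.len ts - PySem.List.len tw + 1 : Int) ≤ 0
  · rw [find_consecutive_match_py_alt, if_pos hs, PySem.List.pyRange_one_eq_nil (by omega)]
    rfl
  · rw [find_consecutive_match_py_alt, if_neg hs]
    show _ = ((PySem.List.pyRange 0 (PySem.List.len ts - PySem.List.len tw + 1) 1).find? _).map _
    refine congrArg _ ?_
    apply pvFindCongr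
    intro x hx
    rw [PySem.List.mem_pyRange_one] at hx
    obtain ⟨hx0, hx1⟩ := hx
    simp only [PySem.List.len_eq] at hx1 hs
    have hxle : x.toNat + tw.length ≤ ts.length := by omega
    have hxlt : x.toNat < ((ts.length : Int) - (tw.length : Int) + 1).toNat := by omega
    rw [show x = ((x.toNat : Nat) : Int) from (Int.toNat_of_nonneg hx0).symm]
    rw [pvCondA, pvFree_eq u ts tw x.toNat hxle, pvAllMatch_eq ts tw (x.toNat : Int)]
    have hlen : x.toNat <
        (List.replicate ((PySem.List.len ts - PySem.List.len tw + 1 : Int)).toNat true).length := by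
      rw [List.length_replicate]
      simpa [PySem.List.len_eq] using hxlt
    rw [Int.toNat_natCast, pvOkLoop_getD ts tw 0 _ x.toNat hlen,
      List.getD_eq_getElem _ _ hlen, List.getElem_replicate, Bool.true_and]
    exact Bool.and_comm _ _
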